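-- pv_equiv track=rewrite | github.com/Miyamoto-creator/Codingstuff | !Python/!python_Codewars/7 Kyu/Printer Errors.py | printer_error
-- ===== SOURCE A (Python) =====
-- def printer_error(string):
--   x = len(string)
--   denom = "a", "b", "c", "d", "e", "f", "g", "h", "i", "j", "k", "l", "m"
--   h = 0
--   for char in string:
--     if char not in denom:
--       h += 1
--       string.replace(char, "")
--   answer = f"{h}/{x}"
--
--   return answer
-- ===== SOURCE B (Python) =====
-- def printer_error(string):
--     counts = {}
--     for ch in string:
--         counts[ch] = counts.get(ch, 0) + 1
--     bad = 0
--     for ch, n in counts.items():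
--         if ch not in "abcdefghijklm":
--             bad += n
--     return f"{bad}/{len(string)}"
-- ===== Notes on version B (the rewrite author's own statement) =====
-- stated objective: alternative
-- what changed: B builds a character-frequency table in one pass and sums the counts of the distinct keys outside the first thirteen lowercase letters, instead of A's per-character membership scan that also calls a discarded string.replace (a full rescan of the string) for every flagged character.
import Mathlib
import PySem

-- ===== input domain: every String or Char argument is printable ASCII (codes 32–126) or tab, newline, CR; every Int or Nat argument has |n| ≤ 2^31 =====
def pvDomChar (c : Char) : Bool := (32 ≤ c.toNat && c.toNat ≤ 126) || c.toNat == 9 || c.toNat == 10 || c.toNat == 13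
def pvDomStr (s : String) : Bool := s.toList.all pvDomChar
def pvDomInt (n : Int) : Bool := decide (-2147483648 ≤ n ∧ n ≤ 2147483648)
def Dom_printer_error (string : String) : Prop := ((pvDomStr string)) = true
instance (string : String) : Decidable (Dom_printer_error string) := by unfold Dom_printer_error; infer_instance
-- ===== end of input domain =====

-- B replaces A's per-character scan (with its discarded per-hit string.replace pass) by one
-- frequency-table build plus a pass over the table's distinct keys; same return value (alternative).

-- ===== PORT A =====
-- the body of A's for-loop (one step of its counter)
def aStep (string : String) (h : Int) (char : Char) : Int :=
  if ((["a","b","c","d","e","f","g","h","i","j","k","l","m"] : List String).contains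
        (String.ofList [char])) = false then
    -- A calls string.replace(char, "") and discards the result (a no-op); ported and discarded likewise
    let _ := PySem.Str.replace string (String.ofList [char]) ""
    h + 1
  else h

def printer_error (string : String) : String :=
  let x : Int := PySem.Str.len string
  let h : Int := string.toList.foldl (aStep string) 0
  PySem.Int.toStr h ++ "/" ++ PySem.Int.toStr x
-- ===== PORT B =====
-- the body of B's loop over the frequency table's items
def bStep (bad : Int) (p : Char × Int) : Int :=
  -- 'ch not in "abcdefghijklm"' for a single char is exactly char membership in its chars
  if ("abcdefghijklm".toList.contains p.1) = false then bad + p.2 else bad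

def printer_error_alt (string : String) : String :=
  let counts : PySem.Dict Char Int :=
    string.toList.foldl (fun d ch => d.insert ch (d.getD ch 0 + 1)) PySem.Dict.empty
  let bad : Int := counts.items.foldl bStep 0
  PySem.Int.toStr bad ++ "/" ++ PySem.Int.toStr (PySem.Str.len string)
-- ===== PRECONDITION & SPEC =====
def Spec_printer_error (string : String) (out : String) : Prop := out = printer_error_alt string
instance (string : String) (out : String) : Decidable (Spec_printer_error string out) := by unfold Spec_printer_error; infer_instance

-- ===== CLAIM (what is proved, stated in full; the proofs are below) =====
def Claim_equal_printer_error : Prop := ∀ (string : String), Dom_printer_error string → Spec_printer_error string (printer_error string)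

-- ===== LEMMAS AND PROOFS =====

theorem ofList_single_eq (c d : Char) : (String.ofList [c] = String.ofList [d]) ↔ c = d := by
  constructor
  · intro h; have := congrArg String.toList h; simpa using this
  · intro h; subst h; rfl

theorem ofList_single_beq (c d : Char) : (String.ofList [c] == String.ofList [d]) = (c == d) := by
  rw [Bool.eq_iff_iff]; simp only [beq_iff_eq]; exact ofList_single_eq c d

-- A's membership test of the one-char string in the tuple equals char membership in the chars
theorem mem_denom (c : Char) :
    ((["a","b","c","d","e","f","g","h","i","j","k","l","m"] : List String).contains
        (String.ofList [c]))
      = ("abcdefghijklm".toList.contains c) := by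
  have ha : ("a" : String) = String.ofList ['a'] := rfl
  have hb : ("b" : String) = String.ofList ['b'] := rfl
  have hc : ("c" : String) = String.ofList ['c'] := rfl
  have hd : ("d" : String) = String.ofList ['d'] := rfl
  have he : ("e" : String) = String.ofList ['e'] := rfl
  have hf : ("f" : String) = String.ofList ['f'] := rfl
  have hg : ("g" : String) = String.ofList ['g'] := rfl
  have hh : ("h" : String) = String.ofList ['h'] := rfl
  have hi : ("i" : String) = String.ofList ['i'] := rfl
  have hj : ("j" : String) = String.ofList ['j'] := rfl
  have hk : ("k" : String) = String.ofList ['k'] := rfl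
  have hl : ("l" : String) = String.ofList ['l'] := rfl
  have hm : ("m" : String) = String.ofList ['m'] := rfl
  simp only [List.contains_cons, List.contains_nil, ha, hb, hc, hd, he, hf, hg, hh, hi, hj, hk,
    hl, hm, ofList_single_beq]
  rfl

theorem aStep_eq (string : String) (h : Int) (c : Char) :
    aStep string h c = if ("abcdefghijklm".toList.contains c) = false then h + 1 else h := by
  unfold aStep
  rw [mem_denom]

-- A's loop counts the characters outside 'a'..'m'
theorem A_loop (string : String) (l : List Char) (a : Int) :
    l.foldl (aStep string) a
      = a + ((l.filter (fun c => !("abcdefghijklm".toList.contains c))).length : Int) := by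
  induction l generalizing a with
  | nil => simp
  | cons c t ih =>
    rw [List.foldl_cons, ih, aStep_eq, List.filter_cons]
    cases hb : ("abcdefghijklm".toList.contains c)
    · simp only [Bool.not_false]
      rw [if_pos trivial, if_pos trivial, List.length_cons]
      push_cast; ring
    · simp only [Bool.not_true]
      rw [if_neg (show ¬(true = false) by decide), if_neg (show ¬(false = true) by decide)]

-- B's table loop sums the counts of the keys outside 'a'..'m'
theorem B_loop (l : List (Char × Int)) (a : Int) :
    l.foldl bStep a
      = a + (l.map (fun p =>
          if ("abcdefghijklm".toList.contains p.1) = false then p.2 else 0)).sum := by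
  induction l generalizing a with
  | nil => simp
  | cons p t ih =>
    rw [List.foldl_cons, ih, List.map_cons, List.sum_cons]
    unfold bStep
    cases hb : ("abcdefghijklm".toList.contains p.1)
    · rw [if_pos rfl, if_pos rfl]; ring
    · rw [if_neg (show ¬(true = false) by decide), if_neg (show ¬(true = false) by decide)]
      ring

-- summing each distinct character's multiplicity is counting the characters
theorem sum_counts (xs : List Char) :
    ((PySem.Set.ofList xs).map (fun k =>
        if ("abcdefghijklm".toList.contains k) = false then (xs.count k : Int) else 0)).sum
      = ((xs.filter (fun c => !("abcdefghijklm".toList.contains c))).length : Int) := by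
  have hnd : (PySem.Set.ofList xs).Nodup := PySem.Set.nodup_ofList xs
  rw [← List.sum_toFinset _ hnd]
  have hfs : (PySem.Set.ofList xs).toFinset = xs.toFinset := by
    ext a; simp [PySem.Set.mem_ofList]
  rw [hfs]
  have hcast : ∑ a ∈ xs.toFinset,
      (if ("abcdefghijklm".toList.contains a) = false then (xs.count a : Int) else 0)
      = ((∑ a ∈ xs.toFinset,
          if ("abcdefghijklm".toList.contains a) = false then xs.count a else 0 : ℕ) : Int) := by
    push_cast; rfl
  rw [hcast, ← Finset.sum_filter]
  have hft : xs.toFinset.filter (fun a => ("abcdefghijklm".toList.contains a) = false)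
      = (xs.filter (fun c => !("abcdefghijklm".toList.contains c))).toFinset := by
    simp [List.toFinset_filter]
  rw [hft]
  have hc : ∀ a ∈ (xs.filter (fun c => !("abcdefghijklm".toList.contains c))).toFinset,
      xs.count a = (xs.filter (fun c => !("abcdefghijklm".toList.contains c))).count a := by
    intro a ha
    simp only [List.mem_toFinset, List.mem_filter] at ha
    exact (List.count_filter (p := fun c => !("abcdefghijklm".toList.contains c)) ha.2).symm
  rw [Finset.sum_congr rfl hc, List.sum_toFinset_count_eq_length]

-- ===== VERDICT (by name: the statement is the Claim_ definition above) =====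
theorem printer_error_spec : Claim_equal_printer_error := by
  intro s _
  unfold Spec_printer_error printer_error printer_error_alt
  dsimp only
  rw [A_loop, PySem.Dict.foldl_insert_getD_add_one_eq_counter, PySem.Dict.items_counter,
    B_loop, List.map_map]
  simp only [Function.comp_def]
  rw [sum_counts]
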